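-- pv_equiv track=rewrite | github.com/luisdelgado/Coleta-e-Busca-de-Entidades-Estruturadas-em-um-Dominio | Crawler.py | weight_link_insert
-- ===== SOURCE A (Python) =====
-- def weight_link_insert(link, word_count, pages_to_visit, url_inicial):
--
--     # Verificando se pagesToVisit está vazia
--     if len(pages_to_visit):
--
--         for idx, page in enumerate(pages_to_visit):
--             url, url_weight = pages_to_visit[idx]
--
--             # Verificando se o peso do novo link é maior que o link atual
--             if word_count > url_weight:
--
--                 # Se pertencer ao link inicial, adiciona link em pagesToVisit
--                 if link.find(url_inicial) > -1:
--                     pages_to_visit.insert(0, (link, word_count))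
--                     break
--
--             # Para último elemento da lista
--             if len(pages_to_visit) == idx+1:
--
--                 # Se pertencer ao link inicial, adiciona link em links
--                 if link.find(url_inicial) > -1:
--                     pages_to_visit = pages_to_visit + [(link, word_count)]
--
--     else:
--
--         if link.find(url_inicial) > -1:
--             pages_to_visit = pages_to_visit + [(link, word_count)]
--
--     return pages_to_visit
-- ===== SOURCE B (Python) =====
-- def weight_link_insert(link, word_count, pages_to_visit, url_inicial):
--     # Characterise A's insert condition via the minimum weight: A prepends iff
--     # some existing weight is strictly below word_count, i.e. iff
--     # min(weights) < word_count; min's default folds the empty list into the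
--     # append branch. Purely functional: never mutates pages_to_visit.
--     if url_inicial not in link:
--         return pages_to_visit
--     threshold = min((w for _, w in pages_to_visit), default=word_count)
--     if word_count > threshold:
--         return [(link, word_count)] + pages_to_visit
--     return pages_to_visit + [(link, word_count)]
-- ===== Notes on version B (the rewrite author's own statement) =====
-- stated objective: simpler
-- what changed: Replaces A's enumerate loop with break/last-element bookkeeping and in-place insertion by a min-with-default reduction: B tests substring containment once, compares word_count against min of the existing weights (default folds the empty case into the append branch), and builds the result purely functionally without mutating the input list.
import Mathlib
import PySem

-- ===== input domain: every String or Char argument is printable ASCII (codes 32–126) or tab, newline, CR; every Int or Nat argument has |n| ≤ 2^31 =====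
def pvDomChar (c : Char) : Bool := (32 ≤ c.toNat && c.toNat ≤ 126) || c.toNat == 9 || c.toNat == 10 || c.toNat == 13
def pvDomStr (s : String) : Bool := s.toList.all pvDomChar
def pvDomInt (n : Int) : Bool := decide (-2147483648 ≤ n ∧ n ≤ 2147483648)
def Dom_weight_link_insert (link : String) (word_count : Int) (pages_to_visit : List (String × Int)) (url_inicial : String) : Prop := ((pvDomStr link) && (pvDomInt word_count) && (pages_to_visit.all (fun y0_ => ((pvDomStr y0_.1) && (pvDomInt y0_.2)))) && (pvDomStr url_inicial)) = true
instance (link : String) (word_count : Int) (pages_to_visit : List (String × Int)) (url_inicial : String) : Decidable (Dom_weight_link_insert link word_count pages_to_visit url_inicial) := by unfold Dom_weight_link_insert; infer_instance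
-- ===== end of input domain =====

-- B characterises A's insert condition by the MINIMUM existing weight (min with default)
-- instead of A's index-tracking scan, and builds the result purely functionally.
-- Return-value equivalence only: A mutates pages_to_visit in place in the insert case, B never mutates.

-- ===== PORT A =====
-- for idx, page in enumerate(pages_to_visit): structural recursion over the remaining list,
-- carrying idx and the (un-mutated until break) full list pages_to_visit.
def weight_link_insert_go (link : String) (word_count : Int)
    (pages_to_visit : List (String × Int)) (url_inicial : String) :
    Nat → List (String × Int) → List (String × Int)
  | _, [] => pages_to_visit
  | idx, (_url, url_weight) :: rest =>
    if word_count > url_weight then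
      if PySem.Str.find link url_inicial > -1 then
        (link, word_count) :: pages_to_visit          -- insert(0, …); break
      else if pages_to_visit.length = idx + 1 then pages_to_visit
      else weight_link_insert_go link word_count pages_to_visit url_inicial (idx + 1) rest
    else if pages_to_visit.length = idx + 1 then
      if PySem.Str.find link url_inicial > -1 then
        pages_to_visit ++ [(link, word_count)]
      else pages_to_visit
    else weight_link_insert_go link word_count pages_to_visit url_inicial (idx + 1) rest

def weight_link_insert (link : String) (word_count : Int) (pages_to_visit : List (String × Int)) (url_inicial : String) : List (String × Int) :=
  if pages_to_visit.length ≠ 0 then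
    weight_link_insert_go link word_count pages_to_visit url_inicial 0 pages_to_visit
  else if PySem.Str.find link url_inicial > -1 then
    pages_to_visit ++ [(link, word_count)]
  else
    pages_to_visit

-- ===== PORT B =====
-- 'url_inicial not in link' → PySem.Str.isIn; min(gen, default=word_count) → PySem.List.min? with getD.
def weight_link_insert_alt (link : String) (word_count : Int) (pages_to_visit : List (String × Int)) (url_inicial : String) : List (String × Int) :=
  if ¬ PySem.Str.isIn url_inicial link then
    pages_to_visit
  else
    let threshold := (PySem.List.min? (pages_to_visit.map Prod.snd) (fun w => w)).getD word_count
    if word_count > threshold then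
      [(link, word_count)] ++ pages_to_visit
    else
      pages_to_visit ++ [(link, word_count)]

-- ===== PRECONDITION & SPEC =====
def Spec_weight_link_insert (link : String) (word_count : Int) (pages_to_visit : List (String × Int)) (url_inicial : String) (out : List (String × Int)) : Prop := out = weight_link_insert_alt link word_count pages_to_visit url_inicial
instance (link : String) (word_count : Int) (pages_to_visit : List (String × Int)) (url_inicial : String) (out : List (String × Int)) : Decidable (Spec_weight_link_insert link word_count pages_to_visit url_inicial out) := by unfold Spec_weight_link_insert; infer_instance

-- ===== CLAIM (what is proved, stated in full; the proofs are below) =====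
def Claim_equal_weight_link_insert : Prop := ∀ (link : String) (word_count : Int) (pages_to_visit : List (String × Int)) (url_inicial : String), Dom_weight_link_insert link word_count pages_to_visit url_inicial → Spec_weight_link_insert link word_count pages_to_visit url_inicial (weight_link_insert link word_count pages_to_visit url_inicial)

-- ===== LEMMAS AND PROOFS =====

-- A's guard 'link.find(url_inicial) > -1' is substring containment.
theorem find_gt_iff_isIn (link url0 : String) :
    PySem.Str.find link url0 > -1 ↔ PySem.Str.isIn url0 link = true := by
  simp only [PySem.Str.find_eq, PySem.Str.isIn_eq, PySem.Chars.isIn_iff_infix]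
  rw [← PySem.Chars.find_nonneg_iff]
  omega

-- If the link does not contain url_inicial, the loop never changes the list.
theorem go_no_match (link : String) (word_count : Int)
    (pages : List (String × Int)) (url0 : String)
    (h : ¬ PySem.Str.find link url0 > -1) :
    ∀ (l : List (String × Int)) (i : Nat),
      weight_link_insert_go link word_count pages url0 i l = pages := by
  intro l
  induction l with
  | nil => intro i; rfl
  | cons x rest ih =>
    intro i
    rw [weight_link_insert_go]
    split_ifs <;> first
      | rfl
      | exact absurd ‹PySem.Str.find link url0 > -1› h
      | exact ih _

-- If the link contains url_inicial and the suffix l (starting at index i, with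
-- i + l.length = pages.length) is nonempty, the loop prepends when some weight
-- in l is below word_count and appends otherwise.
theorem go_match (link : String) (word_count : Int)
    (pages : List (String × Int)) (url0 : String)
    (h : PySem.Str.find link url0 > -1) :
    ∀ (l : List (String × Int)) (i : Nat), l ≠ [] → i + l.length = pages.length →
      weight_link_insert_go link word_count pages url0 i l =
        if l.any (fun p => word_count > p.2) then (link, word_count) :: pages
        else pages ++ [(link, word_count)] := by
  intro l
  induction l with
  | nil => intro i hne _; exact absurd rfl hne
  | cons x rest ih =>
    intro i _ hlen
    rw [weight_link_insert_go]
    cases rest with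
    | nil =>
      have hlast : pages.length = i + 1 := by simpa using hlen.symm
      by_cases hw : word_count > x.2
      · rw [if_pos hw, if_pos h]
        simp [hw]
      · rw [if_neg hw, if_pos hlast, if_pos h]
        simp [hw]
    | cons y rest' =>
      have hnotlast : ¬ pages.length = i + 1 := by
        simp only [List.length_cons] at hlen; omega
      have hlen' : (i + 1) + (y :: rest').length = pages.length := by
        simp only [List.length_cons] at hlen ⊢; omega
      by_cases hw : word_count > x.2
      · rw [if_pos hw, if_pos h]
        simp [hw]
      · rw [if_neg hw, if_neg hnotlast, ih (i + 1) (by simp) hlen']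
        have hx : decide (word_count > x.2) = false := by simpa using hw
        simp only [List.any_cons, hx, Bool.false_or]
        rfl

-- For a nonempty list, 'word_count exceeds the minimum weight' is 'some weight is below word_count'.
theorem min_lt_iff_any (word_count : Int) (pages : List (String × Int)) (m : Int)
    (hm : PySem.List.min? (pages.map Prod.snd) (fun w => w) = some m) :
    word_count > m ↔ pages.any (fun p => word_count > p.2) = true := by
  constructor
  · intro hlt
    have hmem : m ∈ pages.map Prod.snd := PySem.List.min?_mem hm
    obtain ⟨p, hp, hpm⟩ := List.mem_map.mp hmem
    exact List.any_eq_true.mpr ⟨p, hp, by simp [hpm, hlt]⟩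
  · intro hany
    obtain ⟨p, hp, hpw⟩ := List.any_eq_true.mp hany
    have hle : m ≤ p.2 := PySem.List.min?_isMin hm p.2 (List.mem_map.mpr ⟨p, hp, rfl⟩)
    simp at hpw
    omega

-- ===== VERDICT (by name: the statement is the Claim_ definition above) =====
theorem weight_link_insert_spec : Claim_equal_weight_link_insert := by
  intro link word_count pages url0 _
  unfold Spec_weight_link_insert weight_link_insert weight_link_insert_alt
  by_cases h : PySem.Str.find link url0 > -1
  · have hin : PySem.Str.isIn url0 link = true := (find_gt_iff_isIn link url0).mp h
    cases pages with
    | nil =>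
      rw [if_neg (by simp), if_pos h, if_neg (not_not_intro hin)]
      simp [PySem.List.min?]
    | cons x rest =>
      rw [if_pos (by simp),
        go_match link word_count (x :: rest) url0 h (x :: rest) 0 (by simp) (by simp),
        if_neg (not_not_intro hin)]
      obtain ⟨m, hm⟩ : ∃ m, PySem.List.min? ((x :: rest).map Prod.snd) (fun w => w) = some m := by
        cases hc : PySem.List.min? ((x :: rest).map Prod.snd) (fun w => w) with
        | none => exact absurd ((PySem.List.min?_eq_none_iff _ _).mp hc) (by simp)
        | some m => exact ⟨m, rfl⟩
      simp only [hm, Option.getD_some]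
      by_cases hany : (x :: rest).any (fun p => word_count > p.2) = true
      · rw [if_pos hany,
          if_pos ((min_lt_iff_any word_count (x :: rest) m hm).mpr hany)]
        rfl
      · rw [if_neg hany,
          if_neg (fun hlt => hany ((min_lt_iff_any word_count (x :: rest) m hm).mp hlt))]
  · have hin : ¬ PySem.Str.isIn url0 link = true :=
      fun hc => h ((find_gt_iff_isIn link url0).mpr hc)
    cases pages with
    | nil => rw [if_neg (by simp), if_neg h, if_pos hin]
    | cons x rest =>
      rw [if_pos (by simp), go_no_match link word_count (x :: rest) url0 h (x :: rest) 0,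
        if_pos hin]
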